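-- pv_equiv track=rewrite | github.com/epstlight/algorithm | SW_EA/0904/SolvingClub_단조.py | solve
-- ===== SOURCE A (Python) =====
-- def check_danjo(num):
--     num_list = []
--     while num > 0:
--         num_list.append(num % 10)
--         num //= 10
--     for i in range(len(num_list)-1):
--         if num_list[i] < num_list[i+1]:
--             return False
--     return True
--
-- def solve(data):
--     max_danjo = -1
--     for i in range(len(data)):
--         for j in range(i + 1, len(data)):
--             before_check = data[i] * data[j]
--             if max_danjo < before_check  and check_danjo(before_check):
--                 max_danjo = before_check
--     return max_danjo
-- ===== SOURCE B (Python) =====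
-- def check_danjo(num):
--     s = str(num)
--     return s == ''.join(sorted(s))
--
-- def solve(data):
--     n = len(data)
--     valid = [data[i] * data[j]
--              for i in range(n) for j in range(i + 1, n)
--              if check_danjo(data[i] * data[j])]
--     return max([-1] + valid)
-- ===== Notes on version B (the rewrite author's own statement) =====
-- stated objective: simpler
-- what changed: The digit-extraction-and-scan monotonicity predicate is replaced by the sort-based check str(num) == ''.join(sorted(str(num))), and the nested running-max loops are replaced by a comprehension of the valid pairwise products maxed in one call.
import Mathlib
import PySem

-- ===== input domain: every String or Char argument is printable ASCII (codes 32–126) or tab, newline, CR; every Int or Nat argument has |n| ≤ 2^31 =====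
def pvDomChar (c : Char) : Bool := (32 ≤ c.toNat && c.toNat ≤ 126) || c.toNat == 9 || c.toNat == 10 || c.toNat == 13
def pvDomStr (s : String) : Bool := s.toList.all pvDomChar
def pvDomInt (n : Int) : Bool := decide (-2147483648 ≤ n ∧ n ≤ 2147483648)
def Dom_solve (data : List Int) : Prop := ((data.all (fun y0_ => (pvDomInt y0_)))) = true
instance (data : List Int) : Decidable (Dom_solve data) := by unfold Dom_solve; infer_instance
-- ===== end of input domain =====

-- B replaces A's digit-extraction-and-scan predicate by the sort-based one (str(num) equals its
-- sorted form) and A's running-max nested loops by a comprehension of the valid products maxed in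
-- one call; objective: simpler. Agreement of the return values is proved for all inputs.

-- ===== PORT A =====
-- the `while num > 0: num_list.append(num % 10); num //= 10` loop of check_danjo
def pvDigitsLoop (num : Int) (numList : List Int) : List Int :=
  if h : 0 < num then
    pvDigitsLoop (PySem.Int.floordiv num 10) (numList ++ [PySem.Int.mod num 10])
  else numList
termination_by num.toNat
decreasing_by
  have h10 : PySem.Int.floordiv num 10 = num / 10 := PySem.Int.floordiv_eq_ediv_of_pos (by omega)
  rw [h10]; omega

-- the `for i in range(len(num_list)-1): if num_list[i] < num_list[i+1]: return False` scan,
-- as the obvious recursion over adjacent pairs of the same list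
def pvScanLoop : List Int → Bool
  | a :: b :: rest => if a < b then false else pvScanLoop (b :: rest)
  | _ => true

def check_danjo (num : Int) : Bool := pvScanLoop (pvDigitsLoop num [])

def solve (data : List Int) : Int :=
  (PySem.List.pyRange 0 (PySem.List.len data) 1).foldl (fun maxDanjo i =>
    (PySem.List.pyRange (i + 1) (PySem.List.len data) 1).foldl (fun maxDanjo j =>
      let beforeCheck := PySem.List.pyGetD data i 0 * PySem.List.pyGetD data j 0
      if maxDanjo < beforeCheck ∧ check_danjo beforeCheck then beforeCheck else maxDanjo)
      maxDanjo) (-1)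

-- ===== PORT B =====
-- B's check_danjo: s = str(num); s == ''.join(sorted(s))  (string equality on the char lists)
def pvCheckDanjoSorted (num : Int) : Bool :=
  let s := PySem.Int.toChars num
  s == PySem.List.sorted s (fun c => c) false

def solve_alt (data : List Int) : Int :=
  let n := PySem.List.len data
  let valid := (PySem.List.pyRange 0 n 1).flatMap (fun i =>
    ((PySem.List.pyRange (i + 1) n 1).map
        (fun j => PySem.List.pyGetD data i 0 * PySem.List.pyGetD data j 0)).filter
      pvCheckDanjoSorted)
  -- max([-1] + valid): max of a nonempty list (the default of maxD is unreachable)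
  PySem.List.maxD ((-1) :: valid) (fun x => x) (-1)

-- ===== PRECONDITION & SPEC =====
def Spec_solve (data : List Int) (out : Int) : Prop := out = solve_alt data
instance (data : List Int) (out : Int) : Decidable (Spec_solve data out) := by unfold Spec_solve; infer_instance

-- ===== CLAIM (what is proved, stated in full; the proofs are below) =====
def Claim_equal_solve : Prop := ∀ (data : List Int), Dom_solve data → Spec_solve data (solve data)

-- ===== LEMMAS AND PROOFS =====

theorem digitsLoop_eq : ∀ (n : Nat) (acc : List Int),
    pvDigitsLoop (n : Int) acc = acc ++ (Nat.digits 10 n).map (fun d : Nat => (d : Int)) := by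
  intro n
  induction n using Nat.strong_induction_on with
  | _ n ih =>
    intro acc
    rw [pvDigitsLoop]
    by_cases hn : 0 < n
    · have hpos : (0 : Int) < (n : Int) := by exact_mod_cast hn
      rw [dif_pos hpos]
      have hd : PySem.Int.floordiv (n : Int) 10 = ((n / 10 : Nat) : Int) := by
        rw [PySem.Int.floordiv_eq_ediv_of_pos (by norm_num)]
        exact (Int.natCast_ediv n 10).symm
      have hm : PySem.Int.mod (n : Int) 10 = ((n % 10 : Nat) : Int) := by
        rw [PySem.Int.mod_eq_emod_of_pos (by norm_num)]
        exact (Int.natCast_emod n 10).symm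
      rw [hd, hm, ih (n / 10) (Nat.div_lt_self hn (by norm_num)),
        Nat.digits_def' (by norm_num : 1 < 10) hn]
      simp
    · have h0 : n = 0 := by omega
      subst h0
      simp

theorem scan_iff : ∀ l : List Int, pvScanLoop l = true ↔ l.Pairwise (fun a b => b ≤ a) := by
  intro l
  induction l with
  | nil => simp [pvScanLoop]
  | cons a l ih =>
    cases l with
    | nil => simp [pvScanLoop]
    | cons b rest =>
      rw [pvScanLoop]
      constructor
      · intro h
        split_ifs at h with hab
        have hrest := (ih.mp h)
        have hba : b ≤ a := by omega
        simp only [List.pairwise_cons] at hrest ⊢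
        refine ⟨?_, hrest⟩
        intro x hx
        rcases List.mem_cons.mp hx with rfl | hx
        · omega
        · have := hrest.1 x hx; omega
      · intro h
        simp only [List.pairwise_cons] at h
        have hba : b ≤ a := h.1 b (by simp)
        rw [if_neg (by omega)]
        exact ih.mpr (by simp only [List.pairwise_cons]; exact h.2)

theorem toDigits_eq : ∀ n : Nat, 0 < n →
    Nat.toDigits 10 n = ((Nat.digits 10 n).map Nat.digitChar).reverse := by
  intro n
  induction n using Nat.strong_induction_on with
  | _ n ih =>
    intro hn
    rw [Nat.toDigits_eq_if (by norm_num), Nat.digits_def' (by norm_num : 1 < 10) hn]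
    by_cases h10 : n < 10
    · rw [if_pos h10]
      have : n / 10 = 0 := Nat.div_eq_of_lt h10
      rw [this]
      simp [Nat.mod_eq_of_lt h10]
    · rw [if_neg h10, ih (n / 10) (Nat.div_lt_self hn (by norm_num)) (by omega)]
      simp

theorem digitChar_le_iff (d e : Nat) (hd : d < 10) (he : e < 10) :
    (Nat.digitChar e ≤ Nat.digitChar d ↔ e ≤ d) := by
  interval_cases d <;> interval_cases e <;> simp <;> decide

theorem pred_eq (p : Int) (hp : 0 ≤ p) : check_danjo p = pvCheckDanjoSorted p := by
  obtain ⟨n, rfl⟩ := Int.eq_ofNat_of_zero_le hp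
  by_cases hn : 0 < n
  · rw [Bool.eq_iff_iff]
    set ds := Nat.digits 10 n with hds
    have hlt : ∀ d ∈ ds, d < 10 := fun d hd => Nat.digits_lt_base (by norm_num) hd
    have hA : check_danjo (n : Int) = true ↔ ds.Pairwise (fun a b => b ≤ a) := by
      rw [check_danjo, digitsLoop_eq, List.nil_append, scan_iff]
      simp only [List.pairwise_map]
      constructor <;> (intro h; exact h.imp (fun {a b} hab => by exact_mod_cast hab))
    have htc : PySem.Int.toChars (n : Int) = (ds.map Nat.digitChar).reverse := by
      rw [PySem.Int.toChars, if_neg (by omega)]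
      have : ((n : Int)).toNat = n := Int.toNat_natCast n
      rw [this, toDigits_eq n hn]
    have hB : pvCheckDanjoSorted (n : Int) = true ↔ ds.Pairwise (fun a b => b ≤ a) := by
      rw [pvCheckDanjoSorted]
      simp only [htc, beq_iff_eq]
      constructor
      · intro h
        have hpw : ((ds.map Nat.digitChar).reverse).Pairwise (fun a b => a ≤ b) := by
          rw [h]
          exact PySem.List.sorted_pairwise _ _
        rw [List.pairwise_reverse, List.pairwise_map] at hpw
        exact hpw.imp_of_mem (by
          intro a b ha hb hab
          exact (digitChar_le_iff a b (hlt a ha) (hlt b hb)).mp hab)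
      · intro h
        refine (PySem.List.sorted_eq_self_of_pairwise _ _ ?_).symm
        rw [List.pairwise_reverse, List.pairwise_map]
        exact h.imp_of_mem (by
          intro a b ha hb hab
          exact (digitChar_le_iff a b (hlt a ha) (hlt b hb)).mpr hab)
    rw [hA, hB]
  · have h0 : n = 0 := by omega
    subst h0
    have hA : check_danjo ((0 : Nat) : Int) = true := by
      rw [check_danjo, digitsLoop_eq]
      decide
    rw [hA]
    simp only [Nat.cast_zero]
    decide

theorem fold_eq : ∀ (ps : List Int) (m : Int), -1 ≤ m →
    ps.foldl (fun m p => if m < p ∧ check_danjo p then p else m) m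
      = (ps.filter pvCheckDanjoSorted).foldl max m := by
  intro ps
  induction ps with
  | nil => intro m _; rfl
  | cons p ps ih =>
    intro m hm
    simp only [List.foldl_cons, List.filter_cons]
    by_cases hb : pvCheckDanjoSorted p = true
    · rw [if_pos hb]
      simp only [List.foldl_cons]
      by_cases hmp : m < p
      · rw [if_pos ⟨hmp, by rw [pred_eq p (by omega)]; exact hb⟩,
          max_eq_right (le_of_lt hmp)]
        exact ih p (by omega)
      · rw [if_neg (by tauto), max_eq_left (by omega)]
        exact ih m hm
    · rw [if_neg hb]
      by_cases hmp : m < p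
      · rw [if_neg (by rw [pred_eq p (by omega)]; tauto)]
        exact ih m hm
      · rw [if_neg (by tauto)]
        exact ih m hm

theorem solve_eq_alt (data : List Int) : solve data = solve_alt data := by
  rw [solve, solve_alt]
  have h1 : (PySem.List.pyRange 0 (PySem.List.len data) 1).foldl (fun maxDanjo i =>
      (PySem.List.pyRange (i + 1) (PySem.List.len data) 1).foldl (fun maxDanjo j =>
        if maxDanjo < PySem.List.pyGetD data i 0 * PySem.List.pyGetD data j 0 ∧
            check_danjo (PySem.List.pyGetD data i 0 * PySem.List.pyGetD data j 0) then
          PySem.List.pyGetD data i 0 * PySem.List.pyGetD data j 0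
        else maxDanjo) maxDanjo) (-1)
      = ((PySem.List.pyRange 0 (PySem.List.len data) 1).flatMap (fun i =>
          (PySem.List.pyRange (i + 1) (PySem.List.len data) 1).map
            (fun j => PySem.List.pyGetD data i 0 * PySem.List.pyGetD data j 0))).foldl
          (fun m p => if m < p ∧ check_danjo p then p else m) (-1) := by
    rw [List.foldl_flatMap]
    simp only [List.foldl_map]
  rw [h1, fold_eq _ _ (by omega), List.filter_flatMap]
  rw [PySem.List.maxD, PySem.List.max?_id_cons, Option.getD_some]

-- ===== VERDICT (by name: the statement is the Claim_ definition above) =====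
theorem solve_spec : Claim_equal_solve := by
  intro data _
  unfold Spec_solve
  exact solve_eq_alt data
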